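-- pv_equiv track=rewrite | github.com/solomon-2105/CP-31_sheet | 800_rating/30. extremely_round.py | check
-- ===== SOURCE A (Python) =====
-- def check(n):
--     cz=cd=0
--     while n:
--         if n%10==0:
--             cz+=1
--         cd+=1
--         n//=10
--     return cz==cd-1
-- ===== SOURCE B (Python) =====
-- def check(n):
--     if n == 0:
--         return False
--     while n % 10 == 0:
--         n //= 10
--     return 1 <= n <= 9
-- ===== Notes on version B (the rewrite author's own statement) =====
-- stated objective: simpler
-- what changed: Instead of counting zero digits and all digits and comparing the counts, B strips trailing zeros and checks the remainder is a single nonzero digit, looping only over the trailing zeros.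
import Mathlib
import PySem

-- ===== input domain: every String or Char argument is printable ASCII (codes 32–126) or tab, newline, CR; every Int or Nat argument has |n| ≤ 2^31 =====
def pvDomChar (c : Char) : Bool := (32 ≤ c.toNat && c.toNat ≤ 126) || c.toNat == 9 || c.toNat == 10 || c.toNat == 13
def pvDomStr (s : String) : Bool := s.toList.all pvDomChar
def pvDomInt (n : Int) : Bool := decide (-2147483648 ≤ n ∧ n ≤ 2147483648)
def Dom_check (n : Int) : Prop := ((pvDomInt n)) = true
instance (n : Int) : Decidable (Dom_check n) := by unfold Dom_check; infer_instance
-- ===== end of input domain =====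

-- B strips trailing zeros and checks for a single nonzero digit instead of counting all digits.
-- A infinite-loops on negative n (n //= 10 stalls at -1), hence Pre_check restricts to 0 ≤ n.

-- ===== PORT A =====
-- A's while-loop with counters cz, cd; fuel (n.natAbs + 1) suffices for every n ≥ 0
-- (on negative n the Python loop never terminates; such n are outside Pre_check).
def checkLoop : Nat → Int → Int → Int → Int × Int
  | 0, _, cz, cd => (cz, cd)
  | fuel + 1, n, cz, cd =>
    if n ≠ 0 then
      checkLoop fuel (PySem.Int.floordiv n 10)
        (cz + (if PySem.Int.mod n 10 = 0 then 1 else 0)) (cd + 1)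
    else (cz, cd)

def check (n : Int) : Bool :=
  let p := checkLoop (n.natAbs + 1) n 0 0
  decide (p.1 = p.2 - 1)

-- ===== PORT B =====
-- B's while-loop: strip trailing zeros.  Exact on every input (B terminates for all n).
def stripZeros (n : Int) : Int :=
  if h : n ≠ 0 ∧ PySem.Int.mod n 10 = 0 then stripZeros (PySem.Int.floordiv n 10) else n
termination_by n.natAbs
decreasing_by
  rcases h with ⟨hn, hm⟩
  have h10 : PySem.Int.mod n 10 = n % 10 := PySem.Int.mod_eq_emod_of_pos (by norm_num)
  have hd : PySem.Int.floordiv n 10 = n / 10 := PySem.Int.floordiv_eq_ediv_of_pos (by norm_num)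
  rw [hd]
  have : n % 10 = 0 := by rw [← h10]; exact hm
  omega

def check_alt (n : Int) : Bool :=
  if n = 0 then false
  else decide (1 ≤ stripZeros n ∧ stripZeros n ≤ 9)

-- ===== PRECONDITION & SPEC =====
-- Pre_check excludes negative n, on which Python A loops forever (n //= 10 stalls at -1).
def Pre_check (n : Int) : Prop := 0 ≤ n
instance (n : Int) : Decidable (Pre_check n) := by unfold Pre_check; infer_instance
def pvWitness_check : Int := (700)

def Spec_check (n : Int) (out : Bool) : Prop := out = check_alt n
instance (n : Int) (out : Bool) : Decidable (Spec_check n out) := by unfold Spec_check; infer_instance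

-- ===== CLAIM (what is proved, stated in full; the proofs are below) =====
def Claim_equal_check : Prop := ∀ (n : Int), Dom_check n → Pre_check n → Spec_check n (check n)

-- ===== LEMMAS AND PROOFS =====

theorem mod10 (n : Int) : PySem.Int.mod n 10 = n % 10 :=
  PySem.Int.mod_eq_emod_of_pos (by norm_num)

theorem div10 (n : Int) : PySem.Int.floordiv n 10 = n / 10 :=
  PySem.Int.floordiv_eq_ediv_of_pos (by norm_num)

theorem natAbs_div10_lt {n : Int} (h : 0 < n) : (n / 10).natAbs < n.natAbs := by omega

-- accumulator shift: the loop result is the (0,0) result plus the accumulators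
theorem checkLoop_shift (f : Nat) : ∀ (n cz cd : Int),
    checkLoop f n cz cd = ((checkLoop f n 0 0).1 + cz, (checkLoop f n 0 0).2 + cd) := by
  induction f with
  | zero => intro n cz cd; simp [checkLoop]
  | succ f ih =>
    intro n cz cd
    by_cases hn : n = 0
    · simp [checkLoop, hn]
    · simp only [checkLoop, if_pos hn, ne_eq]
      rw [ih (PySem.Int.floordiv n 10) (cz + (if PySem.Int.mod n 10 = 0 then 1 else 0)) (cd + 1),
          ih (PySem.Int.floordiv n 10) (0 + (if PySem.Int.mod n 10 = 0 then 1 else 0)) (0 + 1)]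
      simp only [Prod.mk.injEq]
      constructor <;> ring

-- fuel irrelevance above the digit count, for n ≥ 0
theorem checkLoop_fuel (f : Nat) : ∀ (g : Nat) (n cz cd : Int), 0 ≤ n →
    n.natAbs < f → n.natAbs < g → checkLoop f n cz cd = checkLoop g n cz cd := by
  induction f with
  | zero => intro g n cz cd _ hf _; omega
  | succ f ih =>
    intro g n cz cd hn hf hg
    match g with
    | 0 => omega
    | g + 1 =>
      by_cases h0 : n = 0
      · simp [checkLoop, h0]
      · simp only [checkLoop, if_pos h0, ne_eq]
        have hpos : 0 < n := lt_of_le_of_ne hn (Ne.symm h0)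
        have hlt := natAbs_div10_lt hpos
        rw [div10]
        exact ih g (n / 10) _ _ (by omega) (by omega) (by omega)

def czcd (n : Int) : Int × Int := checkLoop (n.natAbs + 1) n 0 0

theorem check_eq (n : Int) : check n = decide ((czcd n).1 = (czcd n).2 - 1) := rfl

theorem czcd_zero : czcd 0 = (0, 0) := by decide

theorem czcd_step {n : Int} (h : 0 < n) :
    czcd n = ((czcd (n / 10)).1 + (if n % 10 = 0 then 1 else 0), (czcd (n / 10)).2 + 1) := by
  have hn0 : n ≠ 0 := by omega
  have e1 : czcd n
      = checkLoop n.natAbs (n / 10) (0 + if n % 10 = 0 then 1 else 0) (0 + 1) := by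
    show checkLoop (n.natAbs + 1) n 0 0 = _
    simp only [checkLoop, if_pos hn0, ne_eq]
    rw [div10, mod10]
  rw [e1, checkLoop_fuel n.natAbs ((n / 10).natAbs + 1) (n / 10) _ _ (by omega)
        (natAbs_div10_lt h) (by omega), checkLoop_shift]
  simp only [czcd, zero_add]

-- the zero-digit count is strictly below the digit count for every positive n
theorem czcd_lt : ∀ (k : Nat) (n : Int), 0 < n → n.natAbs ≤ k → (czcd n).1 < (czcd n).2 := by
  intro k
  induction k using Nat.strong_induction_on with
  | _ k ih =>
    intro n hn hk
    rw [czcd_step hn]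
    by_cases h9 : n ≤ 9
    · have hd : n / 10 = 0 := by omega
      have hm : n % 10 ≠ 0 := by omega
      simp [hd, czcd_zero, hm]
    · have hpos : 0 < n / 10 := by omega
      have hlt := natAbs_div10_lt hn
      have := ih (n / 10).natAbs (by omega) (n / 10) hpos (le_refl _)
      split_ifs <;> omega

theorem stripZeros_eq_self {n : Int} (h : n % 10 ≠ 0) : stripZeros n = n := by
  rw [stripZeros, dif_neg]
  rw [mod10]; tauto

theorem stripZeros_step {n : Int} (hn : n ≠ 0) (h : n % 10 = 0) :
    stripZeros n = stripZeros (n / 10) := by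
  rw [stripZeros, dif_pos ⟨hn, by rw [mod10]; exact h⟩, div10]

theorem check_eq_alt : ∀ (k : Nat) (n : Int), 0 ≤ n → n.natAbs ≤ k →
    check n = check_alt n := by
  intro k
  induction k using Nat.strong_induction_on with
  | _ k ih =>
    intro n hn hk
    rcases eq_or_lt_of_le hn with h0 | hpos
    · rw [← h0]; decide
    · have hn0 : n ≠ 0 := by omega
      rw [check_eq, check_alt, if_neg hn0, czcd_step hpos]
      by_cases h9 : n ≤ 9
      · -- single digit: both sides are true
        have hd : n / 10 = 0 := by omega
        have hm : n % 10 ≠ 0 := by omega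
        rw [hd, czcd_zero, stripZeros_eq_self hm]
        simp only [decide_eq_decide, if_neg hm]
        omega
      · by_cases hm : n % 10 = 0
        · -- trailing zero: both sides reduce to n / 10
          have hlt := natAbs_div10_lt hpos
          have hih := ih (n / 10).natAbs (by omega) (n / 10) (by omega) (le_refl _)
          rw [check_eq, check_alt, if_neg (by omega : ¬ n / 10 = 0)] at hih
          rw [stripZeros_step hn0 hm, if_pos hm, ← hih]
          simp only [decide_eq_decide]
          omega
        · -- last digit nonzero, n ≥ 10: both sides are false
          have hlow := czcd_lt (n / 10).natAbs (n / 10) (by omega) (le_refl _)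
          rw [stripZeros_eq_self hm, if_neg hm]
          simp only [decide_eq_decide]
          constructor <;> intro h <;> omega

-- ===== VERDICT (by name: the statement is the Claim_ definition above) =====
theorem check_spec : Claim_equal_check := by
  intro n _ hpre
  unfold Spec_check
  exact check_eq_alt n.natAbs n hpre (le_refl _)
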